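-- pv_equiv track=rewrite | github.com/Chranos/bi150-vllm | ae-modelzoo-master@721e72629e9/quant/v1/parallel_runner.py | maybe_ignore
-- ===== SOURCE A (Python) =====
-- from collections import defaultdict
--
-- def maybe_ignore(mapping):
--     groups = defaultdict(list)
--     for k, v in mapping.items():
--         prefix = k.rsplit(".", 1)[0]  # 取前缀（. 之前的部分）
--         groups[prefix].append((k, v))
--
--     result = {}
--     for prefix, items in groups.items():
--         values = {v for _, v in items}
--         if len(values) == 1:
--             for k, v in items:
--                 result[k] = v
--
--     return result
-- ===== SOURCE B (Python) =====
-- def maybe_ignore(mapping):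
--     # One pass recording, per prefix, the first value seen and a "bad" mark the
--     # moment a differing value appears; no per-prefix item lists are stored.
--     first = {}
--     bad = set()
--     for k, v in mapping.items():
--         p = k.rsplit(".", 1)[0]
--         if p not in first:
--             first[p] = v
--         elif v != first[p]:
--             bad.add(p)
--     return {k: v
--             for p in first
--             if p not in bad
--             for k, v in mapping.items()
--             if k.rsplit(".", 1)[0] == p}
-- ===== Notes on version B (the rewrite author's own statement) =====
-- stated objective: alternative
-- what changed: Instead of accumulating per-prefix item lists and testing the value-set size of each group, B makes one pass maintaining only a first-value dict and a 'bad' set of prefixes that ever saw a differing value, then rebuilds the result by re-scanning the mapping for each good prefix.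
import Mathlib
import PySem

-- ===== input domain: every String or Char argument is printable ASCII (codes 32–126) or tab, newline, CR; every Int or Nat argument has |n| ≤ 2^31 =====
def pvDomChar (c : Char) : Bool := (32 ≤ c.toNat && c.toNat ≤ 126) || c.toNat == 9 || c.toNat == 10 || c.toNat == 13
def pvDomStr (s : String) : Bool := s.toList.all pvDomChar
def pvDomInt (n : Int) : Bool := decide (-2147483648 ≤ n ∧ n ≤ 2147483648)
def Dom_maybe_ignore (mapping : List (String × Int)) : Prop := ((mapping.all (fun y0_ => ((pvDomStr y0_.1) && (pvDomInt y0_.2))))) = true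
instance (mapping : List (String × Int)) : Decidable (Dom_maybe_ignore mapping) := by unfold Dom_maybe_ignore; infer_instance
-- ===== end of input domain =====

-- B keeps only a first-value dict and a 'bad' set per prefix (no per-prefix item
-- lists), then re-scans the mapping per good prefix; return values proved equal.

-- k.rsplit(".", 1)[0] : everything before the LAST '.', the whole string if none.
-- Hand-ported (PySem has no rsplit); exact on all strings.
def pyPrefix (s : String) : String :=
  match s.toList.reverse.findIdx? (· == '.') with
  | none => s
  | some i => String.ofList (s.toList.take (s.toList.length - 1 - i))

-- ===== PORT A =====
def maybe_ignore (mapping : List (String × Int)) : List (String × Int) :=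
  let groups : PySem.Dict String (List (String × Int)) :=
    mapping.foldl (fun g kv => g.modify (pyPrefix kv.1) [] (fun xs => xs ++ [kv]))
      PySem.Dict.empty
  let result : PySem.Dict String Int :=
    groups.items.foldl (fun res pit =>
      let values : PySem.Set Int := PySem.Set.ofList (pit.2.map (·.2))
      if values.length == 1 then
        pit.2.foldl (fun r kv => r.insert kv.1 kv.2) res
      else res) PySem.Dict.empty
  result.items

-- ===== PORT B =====
-- loop body of B's first pass (first-value dict, bad set)
def bStep (fb : PySem.Dict String Int × PySem.Set String) (kv : String × Int) :
    PySem.Dict String Int × PySem.Set String :=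
  let p := pyPrefix kv.1
  match fb.1.get? p with
  | none => (fb.1.insert p kv.2, fb.2)
  | some w => if kv.2 ≠ w then (fb.1, fb.2.add p) else fb

def maybe_ignore_alt (mapping : List (String × Int)) : List (String × Int) :=
  let fb := mapping.foldl bStep (PySem.Dict.empty, PySem.Set.empty)
  let res : PySem.Dict String Int :=
    fb.1.keys.foldl (fun r p =>
      if fb.2.contains p then r
      else mapping.foldl
        (fun r kv => if pyPrefix kv.1 == p then r.insert kv.1 kv.2 else r) r)
      PySem.Dict.empty
  res.items

-- ===== PRECONDITION & SPEC =====
def Spec_maybe_ignore (mapping : List (String × Int)) (out : List (String × Int)) : Prop := out = maybe_ignore_alt mapping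
instance (mapping : List (String × Int)) (out : List (String × Int)) : Decidable (Spec_maybe_ignore mapping out) := by unfold Spec_maybe_ignore; infer_instance

-- ===== CLAIM (what is proved, stated in full; the proofs are below) =====
def Claim_equal_maybe_ignore : Prop := ∀ (mapping : List (String × Int)), Dom_maybe_ignore mapping → Spec_maybe_ignore mapping (maybe_ignore mapping)

-- ===== LEMMAS AND PROOFS =====

-- the group of a prefix, in original order
def grp (l : List (String × Int)) (p : String) : List (String × Int) :=
  l.filter (fun kv => pyPrefix kv.1 == p)

lemma foldl_ite_filter {α β : Type} (c : β → Bool) (f : α → β → α) :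
    ∀ (l : List β) (acc : α),
      l.foldl (fun a x => if c x then f a x else a) acc = (l.filter c).foldl f acc := by
  intro l
  induction l with
  | nil => intro acc; rfl
  | cons x t ih =>
    intro acc
    by_cases h : c x = true <;> simp [List.foldl_cons, h, ih]

lemma foldl_add_length_mono {α : Type} [BEq α] :
    ∀ (l : List α) (s : PySem.Set α), s.length ≤ (l.foldl PySem.Set.add s).length := by
  intro l
  induction l with
  | nil => intro s; simp
  | cons x t ih =>
    intro s
    refine le_trans ?_ (ih (PySem.Set.add s x))
    simp only [PySem.Set.add]
    split <;> simp

lemma ofList_append_one {α : Type} [BEq α] (ys : List α) (p : α) :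
    PySem.Set.ofList (ys ++ [p]) = PySem.Set.add (PySem.Set.ofList ys) p := by
  simp [PySem.Set.ofList_eq_foldl, List.foldl_append]

lemma foldl_add_from_singleton (w : Int) :
    ∀ (rest : List Int), ((rest.foldl PySem.Set.add [w]).length = 1) ↔ ∀ v ∈ rest, v = w := by
  intro rest
  induction rest with
  | nil => simp
  | cons x t ih =>
    simp only [List.foldl_cons]
    by_cases h : x = w
    · subst h
      have hx : PySem.Set.add [x] x = [x] := by simp [PySem.Set.add]
      rw [hx]
      simpa using ih
    · have hadd : PySem.Set.add [w] x = [w, x] := by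
        simp [PySem.Set.add]
        intro hcontra
        exact h hcontra
      rw [hadd]
      constructor
      · intro hl
        have := foldl_add_length_mono t [w, x]
        simp at this
        omega
      · intro hall
        exact absurd (hall x (by simp)) h

lemma set_len_one (w : Int) (rest : List Int) :
    ((PySem.Set.ofList (w :: rest)).length = 1) ↔ ∀ v ∈ rest, v = w := by
  rw [PySem.Set.ofList_eq_foldl, List.foldl_cons]
  have h0 : PySem.Set.add ([] : PySem.Set Int) w = [w] := by simp [PySem.Set.add]
  rw [h0]
  exact foldl_add_from_singleton w rest

lemma stB_spec (l : List (String × Int)) :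
    (∀ q, (l.foldl bStep (PySem.Dict.empty, PySem.Set.empty)).1.get? q
        = ((grp l q).map (·.2)).head?)
  ∧ (l.foldl bStep (PySem.Dict.empty, PySem.Set.empty)).1.keys
        = PySem.Set.ofList (l.map (fun kv => pyPrefix kv.1))
  ∧ (∀ q, ((l.foldl bStep (PySem.Dict.empty, PySem.Set.empty)).2.contains q = true)
        ↔ ∃ v ∈ (grp l q).map (·.2), ((grp l q).map (·.2)).head? ≠ some v) := by
  induction l using List.reverseRecOn with
  | nil =>
    refine ⟨?_, ?_, ?_⟩ <;> simp [grp, PySem.Dict.empty, PySem.Dict.get?, PySem.Set.empty,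
      PySem.Dict.keys]
  | append_singleton l x ih =>
    obtain ⟨ha, hb, hc⟩ := ih
    simp only [List.foldl_append, List.foldl_cons, List.foldl_nil]
    have hgrp : ∀ q, grp (l ++ [x]) q
        = grp l q ++ if pyPrefix x.1 == q then [x] else [] := by
      intro q; simp only [grp, List.filter_append, List.filter_cons, List.filter_nil]
    cases hF : (l.foldl bStep (PySem.Dict.empty, PySem.Set.empty)).1.get? (pyPrefix x.1) with
    | none =>
      have hgrpP : grp l (pyPrefix x.1) = [] := by
        have h := ha (pyPrefix x.1)
        rw [hF] at h
        cases hg : grp l (pyPrefix x.1) with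
        | nil => rfl
        | cons a t => rw [hg] at h; simp at h
      have hnc : (l.foldl bStep (PySem.Dict.empty, PySem.Set.empty)).1.contains (pyPrefix x.1) = false := by
        rw [PySem.Dict.contains_eq_isSome_get?, hF]; rfl
      simp only [bStep, hF]
      refine ⟨?_, ?_, ?_⟩
      · intro q
        by_cases hq : q = pyPrefix x.1
        · subst hq
          rw [PySem.Dict.get?_insert_self, hgrp, hgrpP]
          simp
        · rw [PySem.Dict.get?_insert_of_ne _ _ hq, hgrp]
          have hne : (pyPrefix x.1 == q) = false := beq_eq_false_iff_ne.mpr (Ne.symm hq)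
          rw [hne]
          simpa using ha q
      · have hkeys : ((l.foldl bStep (PySem.Dict.empty, PySem.Set.empty)).1.insert (pyPrefix x.1) x.2).keys
            = (l.foldl bStep (PySem.Dict.empty, PySem.Set.empty)).1.keys ++ [pyPrefix x.1] := by
          simp only [PySem.Dict.keys, PySem.Dict.items_insert_of_not_contains _ x.2 hnc,
            List.map_append, List.map_cons, List.map_nil]
        have hpnot : pyPrefix x.1 ∉ PySem.Set.ofList (l.map fun kv => pyPrefix kv.1) := by
          rw [← hb]
          exact (PySem.Dict.get?_eq_none_iff_not_mem_keys _ _).mp hF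
        have hcont : PySem.Set.contains (PySem.Set.ofList (l.map fun kv => pyPrefix kv.1)) (pyPrefix x.1) = false := by
          rw [Bool.eq_false_iff]
          intro hcontra
          exact hpnot ((PySem.Set.contains_iff _ _).mp hcontra)
        rw [hkeys, hb, List.map_append, List.map_cons, List.map_nil, ofList_append_one]
        simp only [PySem.Set.add, hcont]
        simp
      · intro q
        by_cases hq : q = pyPrefix x.1
        · subst hq
          rw [hgrp, hgrpP]
          simp only [beq_self_eq_true, if_true, List.nil_append]
          constructor
          · intro hcontains
            exfalso
            have h := (hc (pyPrefix x.1)).mp hcontains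
            rw [hgrpP] at h
            simp at h
          · intro hex
            exfalso
            simp at hex
        · rw [hgrp]
          have hne : (pyPrefix x.1 == q) = false := beq_eq_false_iff_ne.mpr (Ne.symm hq)
          rw [hne]
          simpa using hc q
    | some w =>
      have hmem : pyPrefix x.1 ∈ (l.foldl bStep (PySem.Dict.empty, PySem.Set.empty)).1.keys := by
        apply (PySem.Dict.contains_iff_mem_keys _ _).mp
        rw [PySem.Dict.contains_eq_isSome_get?, hF]; rfl
      have hhead : ((grp l (pyPrefix x.1)).map (·.2)).head? = some w := by
        rw [← ha (pyPrefix x.1)]; exact hF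
      have hkeys2 : PySem.Set.ofList ((l ++ [x]).map fun kv => pyPrefix kv.1)
          = PySem.Set.ofList (l.map fun kv => pyPrefix kv.1) := by
        rw [List.map_append, List.map_cons, List.map_nil, ofList_append_one]
        have hcont : PySem.Set.contains (PySem.Set.ofList (l.map fun kv => pyPrefix kv.1)) (pyPrefix x.1) = true := by
          apply (PySem.Set.contains_iff _ _).mpr
          rw [← hb]; exact hmem
        simp only [PySem.Set.add, hcont]
        simp
      have haq : ∀ q, ((grp (l ++ [x]) q).map (·.2)).head? = ((grp l q).map (·.2)).head? := by
        intro q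
        rw [hgrp]
        by_cases hq : q = pyPrefix x.1
        · subst hq
          simp only [beq_self_eq_true, if_true, List.map_append, List.head?_append, hhead]
          rfl
        · have hne : (pyPrefix x.1 == q) = false := beq_eq_false_iff_ne.mpr (Ne.symm hq)
          rw [hne]; simp
      simp only [bStep, hF]
      by_cases hv : x.2 = w
      · rw [if_neg (by simp [hv])]
        refine ⟨?_, ?_, ?_⟩
        · intro q; rw [haq q]; exact ha q
        · rw [hkeys2]; exact hb
        · intro q
          rw [haq q, hgrp]
          by_cases hq : q = pyPrefix x.1
          · subst hq
            simp only [beq_self_eq_true, if_true, List.map_append]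
            rw [hc (pyPrefix x.1), hhead]
            subst hv
            simp
            constructor
            · rintro ⟨v, hv1, hv2⟩
              exact ⟨v, Or.inl hv1, hv2⟩
            · rintro ⟨v, hv1 | hv1, hv2⟩
              · exact ⟨v, hv1, hv2⟩
              · exact absurd hv1.symm hv2
          · have hne : (pyPrefix x.1 == q) = false := beq_eq_false_iff_ne.mpr (Ne.symm hq)
            rw [hne]
            simpa using hc q
      · rw [if_pos hv]
        refine ⟨?_, ?_, ?_⟩
        · intro q; rw [haq q]; exact ha q
        · rw [hkeys2]; exact hb
        · intro q
          rw [haq q, hgrp]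
          by_cases hq : q = pyPrefix x.1
          · subst hq
            simp only [beq_self_eq_true, if_true, List.map_append]
            constructor
            · intro _
              refine ⟨x.2, by simp, ?_⟩
              rw [hhead]
              simp
              exact fun h => hv h.symm
            · intro _
              apply (PySem.Set.contains_iff _ _).mpr
              rw [PySem.Set.mem_add]
              right; rfl
          · have hne : (pyPrefix x.1 == q) = false := beq_eq_false_iff_ne.mpr (Ne.symm hq)
            rw [hne]
            have hcadd : ((l.foldl bStep (PySem.Dict.empty, PySem.Set.empty)).2.add (pyPrefix x.1)).contains q
                = (l.foldl bStep (PySem.Dict.empty, PySem.Set.empty)).2.contains q := by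
              by_cases hcq : (l.foldl bStep (PySem.Dict.empty, PySem.Set.empty)).2.contains q = true
              · rw [hcq]
                apply (PySem.Set.contains_iff _ _).mpr
                rw [PySem.Set.mem_add]
                exact Or.inl ((PySem.Set.contains_iff _ _).mp hcq)
              · rw [Bool.eq_false_iff.mpr hcq, Bool.eq_false_iff]
                intro hcontra
                rcases (PySem.Set.mem_add _ _ _).mp ((PySem.Set.contains_iff _ _).mp hcontra) with h | h
                · exact hcq ((PySem.Set.contains_iff _ _).mpr h)
                · exact hq h
            rw [hcadd]
            simpa using hc q

lemma grp_ne_nil_of_mem {mapping : List (String × Int)} {p : String}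
    (hp : p ∈ mapping.map (fun kv => pyPrefix kv.1)) : grp mapping p ≠ [] := by
  obtain ⟨kv, hkv, hpre⟩ := List.mem_map.mp hp
  intro hnil
  have : kv ∈ grp mapping p := by
    apply List.mem_filter.mpr
    exact ⟨hkv, by simp [hpre]⟩
  rw [hnil] at this
  simp at this

theorem maybe_ignore_eq (mapping : List (String × Int)) :
    maybe_ignore mapping = maybe_ignore_alt mapping := by
  obtain ⟨ha, hb, hc⟩ := stB_spec mapping
  -- A's grouping dict, reshaped to a fold over (prefix, item) pairs
  have hfold : mapping.foldl (fun g kv => g.modify (pyPrefix kv.1) [] (fun xs => xs ++ [kv]))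
        (PySem.Dict.empty : PySem.Dict String (List (String × Int)))
      = (mapping.map (fun kv => (pyPrefix kv.1, kv))).foldl
          (fun d pr => d.modify pr.1 [] (fun xs => xs ++ [pr.2])) PySem.Dict.empty := by
    rw [List.foldl_map]
  have hgetD : ∀ c, (mapping.foldl (fun g kv => g.modify (pyPrefix kv.1) [] (fun xs => xs ++ [kv]))
        (PySem.Dict.empty : PySem.Dict String (List (String × Int)))).getD c [] = grp mapping c := by
    intro c
    rw [hfold, PySem.Dict.getD_foldl_modify_append]
    simp [grp, List.filter_map, Function.comp_def]
  have hkeysA : (mapping.foldl (fun g kv => g.modify (pyPrefix kv.1) [] (fun xs => xs ++ [kv]))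
        (PySem.Dict.empty : PySem.Dict String (List (String × Int)))).keys
      = PySem.Set.ofList (mapping.map (fun kv => pyPrefix kv.1)) := by
    rw [PySem.Dict.keys_foldl_modify_key mapping (fun kv => pyPrefix kv.1) [] (fun _ kv xs => xs ++ [kv])]
    simp [PySem.Set.update_nil_left, PySem.Dict.empty, PySem.Dict.keys]
  have hnodupA : (mapping.foldl (fun g kv => g.modify (pyPrefix kv.1) [] (fun xs => xs ++ [kv]))
        (PySem.Dict.empty : PySem.Dict String (List (String × Int)))).keys.Nodup := by
    apply PySem.Dict.nodup_keys_foldl_modify_key mapping (fun kv => pyPrefix kv.1) [] (fun _ kv xs => xs ++ [kv])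
    simp [PySem.Dict.empty, PySem.Dict.keys]
  have hitems : (mapping.foldl (fun g kv => g.modify (pyPrefix kv.1) [] (fun xs => xs ++ [kv]))
        (PySem.Dict.empty : PySem.Dict String (List (String × Int)))).items
      = (PySem.Set.ofList (mapping.map (fun kv => pyPrefix kv.1))).map (fun p => (p, grp mapping p)) := by
    rw [PySem.Dict.items_eq_map_keys _ hnodupA []]
    rw [hkeysA]
    apply List.map_congr_left
    intro p _
    rw [hgetD p]
  simp only [maybe_ignore, maybe_ignore_alt]
  rw [hitems, List.foldl_map, hb]
  apply congrArg PySem.Dict.items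
  apply PySem.List.foldl_congr_mem
  intro acc p hp
  have hpmem : p ∈ mapping.map (fun kv => pyPrefix kv.1) := by
    have := (PySem.Set.mem_ofList _ _).mp hp
    exact this
  obtain ⟨v0, t, hvt⟩ : ∃ v0 t, (grp mapping p).map (·.2) = v0 :: t := by
    cases hg : grp mapping p with
    | nil => exact absurd hg (grp_ne_nil_of_mem hpmem)
    | cons a s => exact ⟨a.2, s.map (·.2), by simp⟩
  have hcond : ((mapping.foldl bStep (PySem.Dict.empty, PySem.Set.empty)).2.contains p = true)
      ↔ ¬ ((PySem.Set.ofList ((grp mapping p).map (·.2))).length = 1) := by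
    rw [hc p, hvt, set_len_one]
    simp only [List.head?_cons, ne_eq, Option.some.injEq, List.mem_cons, not_forall]
    constructor
    · rintro ⟨v, hv | hv, hne⟩
      · exact absurd hv.symm hne
      · exact ⟨v, hv, fun h => hne h.symm⟩
    · rintro ⟨v, hv, hne⟩
      exact ⟨v, Or.inr hv, fun h => hne h.symm⟩
  rw [foldl_ite_filter]
  by_cases hlen : (PySem.Set.ofList ((grp mapping p).map (·.2))).length = 1
  · have hcf : (mapping.foldl bStep (PySem.Dict.empty, PySem.Set.empty)).2.contains p = false := by
      rw [Bool.eq_false_iff]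
      intro hcontra
      exact (hcond.mp hcontra) hlen
    rw [if_pos (by simpa using hlen), hcf]
    rfl
  · have hct : (mapping.foldl bStep (PySem.Dict.empty, PySem.Set.empty)).2.contains p = true :=
      hcond.mpr hlen
    rw [if_neg (by simpa using hlen), hct]
    rfl

-- ===== VERDICT (by name: the statement is the Claim_ definition above) =====
theorem maybe_ignore_spec : Claim_equal_maybe_ignore := by
  intro mapping _
  exact maybe_ignore_eq mapping
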